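-- pv_equiv track=rewrite | github.com/jejellyroll-fr/fpdb-3 | pyfpdb/DerivedStats.py | noBetsBefore
-- ===== SOURCE A (Python) =====
-- def noBetsBefore(actions, street, player):
--     """
--     Returns True if there were no bets before the specified player's turn, False otherwise.
--
--     Parameters:
--     actions (list): The list of actions taken during the game.
--     street (str): The current street of the game.
--     player (int): The player for whom we want to check if there were no bets before their turn.
--
--     Returns:
--     bool: True if there were no bets before the specified player's turn, False otherwise.
--     """
--     noBetsBefore = False
--
--     # Loop through each action in the current street
--     for act in actions[street]:
--         # Must test for player first in case they are UTG
--         if act[0] == player: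
--             noBetsBefore = True
--             break
--         # If a bet, raise, or completion is made, then there were bets before the specified player's turn
--         if act[1] in ('bets', 'raises', 'completes'):
--             break
--
--     return noBetsBefore
-- ===== SOURCE B (Python) =====
-- def noBetsBefore(actions, street, player):
--     acts = actions[street]
--     firstPlayer = next((i for i, act in enumerate(acts) if act[0] == player), None)
--     if firstPlayer is None:
--         return False
--     firstBet = next((i for i, act in enumerate(acts)
--                      if act[1] in ('bets', 'raises', 'completes')), None)
--     return firstBet is None or firstPlayer <= firstBet
-- ===== Notes on version B (the rewrite author's own statement) =====
-- stated objective: alternative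
-- what changed: Replaces A's single break-driven scan carrying a flag with an index-based decomposition: find the index of the player's first action and of the first bet/raise/complete, then compare the two indices.
import Mathlib
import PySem

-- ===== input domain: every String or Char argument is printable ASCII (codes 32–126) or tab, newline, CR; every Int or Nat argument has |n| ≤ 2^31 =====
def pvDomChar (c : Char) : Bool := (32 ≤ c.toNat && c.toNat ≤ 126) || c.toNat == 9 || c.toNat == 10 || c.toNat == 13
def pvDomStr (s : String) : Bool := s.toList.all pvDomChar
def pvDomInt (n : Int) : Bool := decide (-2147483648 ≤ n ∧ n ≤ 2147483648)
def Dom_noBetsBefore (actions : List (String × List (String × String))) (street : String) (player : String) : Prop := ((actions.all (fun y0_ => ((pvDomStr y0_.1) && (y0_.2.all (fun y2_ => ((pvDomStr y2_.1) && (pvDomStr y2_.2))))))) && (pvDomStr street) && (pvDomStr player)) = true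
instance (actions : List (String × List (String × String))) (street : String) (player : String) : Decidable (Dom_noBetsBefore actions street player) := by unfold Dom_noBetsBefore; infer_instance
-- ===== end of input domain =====

-- ===== PORT A =====
-- A: single scan with a break-driven flag; actions[street] = first-match lookup (KeyError excluded by Pre_).
def noBetsBeforeLoopA (player : String) : List (String × String) → Bool
  | [] => false
  | act :: rest =>
    if act.1 == player then true
    else if act.2 == "bets" || act.2 == "raises" || act.2 == "completes" then false
    else noBetsBeforeLoopA player rest

def noBetsBefore (actions : List (String × List (String × String))) (street : String) (player : String) : Bool :=
  match (PySem.Dict.mk actions).get? street with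
  | some acts => noBetsBeforeLoopA player acts
  | none => false  -- unreachable under Pre_ (Python raises KeyError)

-- ===== PORT B =====
-- B: two index finds (next/enumerate in Source B), then compare the indices.
def noBetsBefore_alt (actions : List (String × List (String × String))) (street : String) (player : String) : Bool :=
  match (PySem.Dict.mk actions).get? street with
  | none => false  -- unreachable under Pre_ (Python raises KeyError)
  | some acts =>
    match acts.findIdx? (fun act => act.1 == player) with
    | none => false
    | some fp =>
      match acts.findIdx? (fun act => act.2 == "bets" || act.2 == "raises" || act.2 == "completes") with
      | none => true
      | some fb => decide (fp ≤ fb)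

-- ===== PRECONDITION & SPEC =====
-- Pre_ excludes exactly the inputs where Python A raises KeyError: street must be a key of actions.
def Pre_noBetsBefore (actions : List (String × List (String × String))) (street : String) (player : String) : Prop :=
  street ∈ actions.map Prod.fst
instance (actions : List (String × List (String × String))) (street : String) (player : String) : Decidable (Pre_noBetsBefore actions street player) := by unfold Pre_noBetsBefore; infer_instance

def pvWitness_noBetsBefore : (List (String × List (String × String))) × String × String :=
  ([("flop", [("p1", "checks"), ("p2", "bets")])], "flop", "p2")

def Spec_noBetsBefore (actions : List (String × List (String × String))) (street : String) (player : String) (out : Bool) : Prop := out = noBetsBefore_alt actions street player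
instance (actions : List (String × List (String × String))) (street : String) (player : String) (out : Bool) : Decidable (Spec_noBetsBefore actions street player out) := by unfold Spec_noBetsBefore; infer_instance

-- ===== CLAIM (what is proved, stated in full; the proofs are below) =====
def Claim_equal_noBetsBefore : Prop := ∀ (actions : List (String × List (String × String))) (street : String) (player : String), Dom_noBetsBefore actions street player → Pre_noBetsBefore actions street player → Spec_noBetsBefore actions street player (noBetsBefore actions street player)

-- ===== LEMMAS AND PROOFS =====
def altCore (player : String) (acts : List (String × String)) : Bool :=
  match acts.findIdx? (fun act => act.1 == player) with
  | none => false
  | some fp =>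
    match acts.findIdx? (fun act => act.2 == "bets" || act.2 == "raises" || act.2 == "completes") with
    | none => true
    | some fb => decide (fp ≤ fb)

theorem loopA_eq_altCore (player : String) (acts : List (String × String)) :
    noBetsBeforeLoopA player acts = altCore player acts := by
  induction acts with
  | nil => rfl
  | cons act rest ih =>
    simp only [noBetsBeforeLoopA, altCore, List.findIdx?_cons]
    by_cases hp : (act.1 == player) = true
    · simp [hp]
      cases h : List.findIdx? (fun a => a.2 == "bets" || a.2 == "raises" || a.2 == "completes") rest <;>
        simp [h] <;> split <;> simp
    · by_cases hb : (act.2 == "bets" || act.2 == "raises" || act.2 == "completes") = true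
      · simp [hp, hb]
        cases h : List.findIdx? (fun a => a.1 == player) rest <;> simp
      · simp only [hp, hb, if_neg, Bool.false_eq_true, not_false_eq_true]
        rw [ih]
        simp only [altCore]
        cases h1 : List.findIdx? (fun a => a.1 == player) rest <;>
          cases h2 : List.findIdx? (fun a => a.2 == "bets" || a.2 == "raises" || a.2 == "completes") rest <;>
          simp

-- ===== VERDICT (by name: the statement is the Claim_ definition above) =====
theorem noBetsBefore_spec : Claim_equal_noBetsBefore := by
  intro actions street player _ _
  unfold Spec_noBetsBefore noBetsBefore noBetsBefore_alt
  cases h : (PySem.Dict.mk actions).get? street with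
  | none => rfl
  | some acts => exact loopA_eq_altCore player acts
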